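-- pv_equiv track=rewrite | github.com/schneidrew/worlde | utils/complete_colours.py | get_complete_colours
-- ===== SOURCE A (Python) =====
-- def get_complete_colours(guess:str, goal_word:str):
--
--     guess, goal_word = guess.strip().upper(), goal_word.strip().upper()
--     assert len(guess) == len(goal_word), "the two words must be of the same length"
--
--     colours = ["neutral"]*len(guess)
--
--     char_dict = get_char_dict(guess, goal_word)
--
--     for char, dict_ in char_dict.items():
--         counter = 0
--         if not dict_['goal']:
--             for index in dict_['guess']:
--                 colours[index] = 'incorrect'
--         else:
--             for index in dict_['guess']:
--                 if index in dict_['goal']: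
--                     colours[index] = 'correct'
--                     counter += 1
--                 else:
--                     pass
--             for index in dict_['guess']:
--                 if index not in dict_['goal']:
--                     if counter < len(dict_['goal']):
--                         colours[index] = 'partial'
--                         counter += 1
--                     else:
--                         colours[index] = 'incorrect'
--
--     assert "neutral" not in colours, "None of the colours can remain neutral"
--     return colours
--
-- def get_char_dict(guess:str, goal:str):
--     char_dict = {}
--     for i, char in enumerate(guess):
--         temp_dict = {}
--         temp_dict['guess'] = [i for i, c in enumerate(guess) if c == char]
--         temp_dict['goal'] = [i for i, c in enumerate(goal) if c == char]
--         char_dict[char] = temp_dict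
--     return char_dict
-- ===== SOURCE B (Python) =====
-- def get_complete_colours(guess: str, goal_word: str):
--     s = guess.strip().upper()
--     t = goal_word.strip().upper()
--     assert len(s) == len(t), "the two words must be of the same length"
--     counts = {}
--     for a, b in zip(s, t):
--         if a != b:
--             counts[b] = counts.get(b, 0) + 1
--     colours = []
--     for a, b in zip(s, t):
--         if a == b:
--             colours.append("correct")
--         elif counts.get(a, 0) > 0:
--             colours.append("partial")
--             counts[a] -= 1
--         else:
--             colours.append("incorrect")
--     return colours
-- ===== Notes on version B (the rewrite author's own statement) =====
-- stated objective: faster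
-- what changed: Replaces the per-character dict of index lists (each built by a full scan of both words, then three passes over the index lists) by the standard two-pass Wordle algorithm: one pass counts goal letters at non-exact positions, a second pass emits correct/partial/incorrect left to right while decrementing the counter.
import Mathlib
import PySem

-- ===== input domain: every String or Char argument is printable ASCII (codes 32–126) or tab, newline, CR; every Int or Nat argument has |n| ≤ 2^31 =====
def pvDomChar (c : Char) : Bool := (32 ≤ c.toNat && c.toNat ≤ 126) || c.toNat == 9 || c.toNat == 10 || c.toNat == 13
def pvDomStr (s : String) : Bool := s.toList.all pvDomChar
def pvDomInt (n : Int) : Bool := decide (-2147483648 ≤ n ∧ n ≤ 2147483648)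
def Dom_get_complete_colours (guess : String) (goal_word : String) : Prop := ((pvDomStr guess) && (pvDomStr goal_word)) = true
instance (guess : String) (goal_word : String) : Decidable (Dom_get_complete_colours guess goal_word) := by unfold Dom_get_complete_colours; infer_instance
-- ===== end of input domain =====

-- B replaces A's per-character dict of index lists (each built by a full scan, then three passes
-- over the index lists) by the standard two-pass Wordle colouring with a remaining-letter counter.

-- ===== PORT A =====
-- guess.strip().upper() (both programs start with the same two string methods)
def pvPrep (w : String) : List Char := PySem.Chars.upper (PySem.Chars.strip w.toList)

-- [i for i, c in enumerate(l) if c == char]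
def pvIdxs (l : List Char) (c : Char) : List Nat :=
  (l.zipIdx.filter (fun p => p.1 == c)).map (fun p => p.2)

-- get_char_dict: for i, char in enumerate(guess): char_dict[char] = {'guess': …, 'goal': …}
def pvCharDict (s t : List Char) : PySem.Dict Char (List Nat × List Nat) :=
  s.zipIdx.foldl (fun d p => d.insert p.1 (pvIdxs s p.1, pvIdxs t p.1)) PySem.Dict.empty

-- the body of A's `for char, dict_ in char_dict.items()` loop (counter, three inner passes)
def pvApplyGroup (e : Char × (List Nat × List Nat)) (colours : List String) : List String :=
  let gi := e.2.1
  let go := e.2.2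
  if go = [] then
    gi.foldl (fun cs i => cs.set i "incorrect") colours
  else
    let st1 := gi.foldl (fun (st : List String × Int) i =>
      if i ∈ go then (st.1.set i "correct", st.2 + 1) else st) (colours, 0)
    (gi.foldl (fun (st : List String × Int) i =>
      if i ∉ go then
        (if st.2 < (go.length : Int) then (st.1.set i "partial", st.2 + 1)
         else (st.1.set i "incorrect", st.2))
      else st) st1).1

-- A; under Pre_ the two asserts always pass (same lengths; every index is coloured by its own
-- character's group), so they are no-ops here.
def get_complete_colours (guess : String) (goal_word : String) : List String :=
  let s := pvPrep guess
  let t := pvPrep goal_word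
  let colours := List.replicate s.length "neutral"
  (pvCharDict s t).items.foldl (fun cs e => pvApplyGroup e cs) colours

-- ===== PORT B =====
-- body of B's second loop: correct / partial-while-counter-positive / incorrect
def pvBStep (st : List String × PySem.Dict Char Int) (p : Char × Char) :
    List String × PySem.Dict Char Int :=
  if p.1 = p.2 then (st.1 ++ ["correct"], st.2)
  else if st.2.getD p.1 0 > 0 then (st.1 ++ ["partial"], st.2.insert p.1 (st.2.getD p.1 0 - 1))
  else (st.1 ++ ["incorrect"], st.2)

def get_complete_colours_alt (guess : String) (goal_word : String) : List String :=
  let s := pvPrep guess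
  let t := pvPrep goal_word
  let counts := (s.zip t).foldl
    (fun d p => if p.1 ≠ p.2 then d.insert p.2 (d.getD p.2 0 + 1) else d) PySem.Dict.empty
  ((s.zip t).foldl pvBStep ([], counts)).1

-- ===== PRECONDITION & SPEC =====
-- A raises AssertionError when the stripped words have different lengths; exactly those inputs
-- are excluded (upper() preserves length).
def Pre_get_complete_colours (guess : String) (goal_word : String) : Prop :=
  (PySem.Chars.strip guess.toList).length = (PySem.Chars.strip goal_word.toList).length
instance (guess : String) (goal_word : String) : Decidable (Pre_get_complete_colours guess goal_word) := by
  unfold Pre_get_complete_colours; infer_instance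

def pvWitness_get_complete_colours : String × String := ("RATE", "TEAR")

def Spec_get_complete_colours (guess : String) (goal_word : String) (out : List String) : Prop :=
  out = get_complete_colours_alt guess goal_word
instance (guess : String) (goal_word : String) (out : List String) : Decidable (Spec_get_complete_colours guess goal_word out) := by
  unfold Spec_get_complete_colours; infer_instance

-- ===== CLAIM (what is proved, stated in full; the proofs are below) =====
def Claim_equal_get_complete_colours : Prop := ∀ (guess : String) (goal_word : String), Dom_get_complete_colours guess goal_word → Pre_get_complete_colours guess goal_word → Spec_get_complete_colours guess goal_word (get_complete_colours guess goal_word)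

-- ===== LEMMAS AND PROOFS =====

-- The common positional model: colour of position j in zip(guess, goal), where pvG counts the
-- goal occurrences of a character, pvM the exact matches, pvR' the non-exact guess occurrences
-- in a prefix, and pvI the goal occurrences at non-exact positions.
def pvG (z : List (Char × Char)) (c : Char) : Nat := z.countP (fun p => p.2 == c)
def pvM (z : List (Char × Char)) (c : Char) : Nat := z.countP (fun p => p.1 == c && p.2 == c)
def pvI (z : List (Char × Char)) (c : Char) : Nat := z.countP (fun p => p.2 == c && !(p.1 == p.2))
lemma pv_take_zip (s : List Char) : ∀ (t : List Char) (j : Nat),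
    (s.zip t).take j = (s.take j).zip (t.take j) := by
  induction s with
  | nil => intro t j; simp
  | cons a s ih =>
    intro t j
    cases t with
    | nil => simp
    | cons b t => cases j with
      | zero => simp
      | succ j => simp [List.zip_cons_cons, ih]

lemma pvSplitGMI (z : List (Char × Char)) (c : Char) : pvG z c = pvM z c + pvI z c := by
  induction z with
  | nil => simp [pvG, pvM, pvI]
  | cons p z ih =>
    simp only [pvG, pvM, pvI, List.countP_cons] at *
    by_cases h1 : p.1 = c <;> by_cases h2 : p.2 = c <;>
      simp [h1, h2, beq_iff_eq] <;> omega

lemma pv_map_fst_zipIdx (l : List Char) : ∀ (k : Nat), (l.zipIdx k).map Prod.fst = l := by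
  induction l with
  | nil => intro k; simp
  | cons a l ih => intro k; simp [List.zipIdx_cons, ih]

def pvIdxsF (l : List Char) (c : Char) (k : Nat) : List Nat :=
  ((l.zipIdx k).filter (fun p => p.1 == c)).map (fun p => p.2)

lemma pvIdxsF_cons (a : Char) (l : List Char) (c : Char) (k : Nat) :
    pvIdxsF (a :: l) c k = (if a == c then [k] else []) ++ pvIdxsF l c (k + 1) := by
  by_cases h : a == c <;> simp [pvIdxsF, List.zipIdx_cons, List.filter_cons, h]

lemma pvIdxsF_shift (l : List Char) : ∀ (c : Char) (k : Nat),
    pvIdxsF l c k = (pvIdxs l c).map (· + k) := by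
  induction l with
  | nil => intro c k; simp [pvIdxsF, pvIdxs]
  | cons a l ih =>
    intro c k
    have h0 : pvIdxs (a :: l) c = pvIdxsF (a :: l) c 0 := rfl
    rw [pvIdxsF_cons, h0, pvIdxsF_cons, ih c (k+1), ih c 1]
    by_cases h : a == c <;> simp [h, List.map_map, Function.comp] <;>
      · intro x _; omega

lemma pvIdxs_cons (a : Char) (l : List Char) (c : Char) :
    pvIdxs (a :: l) c = (if a == c then [0] else []) ++ (pvIdxs l c).map (· + 1) := by
  have h0 : pvIdxs (a :: l) c = pvIdxsF (a :: l) c 0 := rfl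
  rw [h0, pvIdxsF_cons, pvIdxsF_shift]

lemma pv_mem_idxs (l : List Char) : ∀ (c : Char) (i : Nat),
    i ∈ pvIdxs l c ↔ i < l.length ∧ l.getD i ' ' = c := by
  induction l with
  | nil => intro c i; simp [pvIdxs]
  | cons a l ih =>
    intro c i
    rw [pvIdxs_cons]
    cases i with
    | zero =>
      by_cases h : a = c
      · simp [pvIdxs_cons, h]
      · have hb : (a == c) = false := by simp [h]
        simp [pvIdxs_cons, hb, h]
    | succ i =>
      by_cases h : a == c <;>
        simp [h, List.mem_map, ih, List.getD_cons_succ] <;> constructor <;>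
          (try rintro ⟨x, hx1, hx2, hx3⟩) <;> (try rintro ⟨h1, h2⟩) <;> first
          | (exact ⟨by omega, by simpa [show x = i by omega] using hx3⟩)
          | (exact ⟨i, by omega, h2, rfl⟩)
          | skip

lemma pvIdxs_append (u v : List Char) (c : Char) :
    pvIdxs (u ++ v) c = pvIdxs u c ++ (pvIdxs v c).map (· + u.length) := by
  have : pvIdxs (u ++ v) c = pvIdxsF (u ++ v) c 0 := rfl
  rw [this]
  unfold pvIdxsF
  rw [List.zipIdx_append, List.filter_append, List.map_append]
  congr 1
  have h2 : List.map (fun p => p.2) (List.filter (fun p => p.1 == c) (v.zipIdx (0 + u.length)))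
      = pvIdxsF v c (0 + u.length) := rfl
  rw [h2, pvIdxsF_shift]
  simp

lemma pvIdxs_length (l : List Char) : ∀ (c : Char), (pvIdxs l c).length = l.count c := by
  induction l with
  | nil => intro c; simp [pvIdxs]
  | cons a l ih =>
    intro c
    rw [pvIdxs_cons, List.count_cons]
    by_cases h : a == c <;> simp [h, ih]

lemma pv_bridge (s : List Char) : ∀ (t : List Char), s.length = t.length → ∀ (c : Char) (Q : Char → Bool),
    (pvIdxs s c).countP (fun i => Q (t.getD i ' ')) =
      (s.zip t).countP (fun p => p.1 == c && Q p.2) := by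
  induction s with
  | nil => intro t h c Q; simp [pvIdxs]
  | cons a s ih =>
    intro t h c Q
    cases t with
    | nil => simp at h
    | cons b t =>
      rw [pvIdxs_cons, List.countP_append, List.countP_map, List.zip_cons_cons, List.countP_cons]
      have htail : (List.countP ((fun i => Q ((b :: t).getD i ' ')) ∘ (· + 1)) (pvIdxs s c))
          = List.countP (fun p => p.1 == c && Q p.2) (s.zip t) := by
        rw [← ih t (by simpa using h) c Q]
        apply List.countP_congr
        intro x _; simp [Function.comp, List.getD_cons_succ]
      rw [htail]
      by_cases hac : a == c <;> by_cases hQ : Q b <;> simp [hac, hQ] <;> omega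

lemma pv_getD_zip (s t : List Char) (h : s.length = t.length) (j : Nat) (hj : j < s.length) :
    (s.zip t).getD j (' ', ' ') = (s.getD j ' ', t.getD j ' ') := by
  have hz : j < (s.zip t).length := by simp [List.length_zip]; omega
  rw [List.getD_eq_getElem _ _ hz, List.getElem_zip,
      List.getD_eq_getElem _ _ hj, List.getD_eq_getElem _ _ (by omega)]


lemma pv_setsCond (P : Nat → Prop) [DecidablePred P] (v : String) :
    ∀ (l : List Nat) (cs : List String) (j : Nat),
    (l.foldl (fun cs i => if P i then cs.set i v else cs) cs)[j]? =
      if j ∈ l ∧ P j then (if j < cs.length then some v else none) else cs[j]? := by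
  intro l
  induction l with
  | nil => intro cs j; simp
  | cons i l ih =>
    intro cs j
    rw [List.foldl_cons]
    by_cases hPi : P i
    · rw [if_pos hPi, ih]
      by_cases hji : j = i
      · subst hji
        by_cases hil : j ∈ l <;>
          simp [hPi, hil, List.getElem?_set, List.length_set]
      · by_cases hjl : j ∈ l <;> by_cases hPj : P j <;>
          simp [hji, hjl, hPj, List.getElem?_set, List.length_set, Ne.symm hji]
    · rw [if_neg hPi, ih]
      by_cases hji : j = i
      · subst hji; simp [hPi]
      · simp [hji]

lemma pv_setsCond_length (P : Nat → Prop) [DecidablePred P] (v : String) :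
    ∀ (l : List Nat) (cs : List String),
    (l.foldl (fun cs i => if P i then cs.set i v else cs) cs).length = cs.length := by
  intro l
  induction l with
  | nil => intro cs; rfl
  | cons i l ih =>
    intro cs
    rw [List.foldl_cons]
    by_cases hPi : P i <;> simp [hPi, ih, List.length_set]

def pvPass2 (go : List Nat) (L : Int) (l : List Nat) (st : List String × Int) :
    List String × Int :=
  l.foldl (fun (st : List String × Int) i =>
    if i ∉ go then
      (if st.2 < L then (st.1.set i "partial", st.2 + 1) else (st.1.set i "incorrect", st.2))
    else st) st

lemma pvPass2_cons (go : List Nat) (L : Int) (i : Nat) (l : List Nat) (cs : List String) (k : Int) :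
    pvPass2 go L (i :: l) (cs, k) =
      if i ∈ go then pvPass2 go L l (cs, k)
      else if k < L then pvPass2 go L l (cs.set i "partial", k + 1)
      else pvPass2 go L l (cs.set i "incorrect", k) := by
  unfold pvPass2
  rw [List.foldl_cons]
  by_cases hi : i ∈ go <;> by_cases hk : k < L <;> simp [hi, hk]

lemma pvPass2_length (go : List Nat) (L : Int) :
    ∀ (l : List Nat) (cs : List String) (k : Int),
    (pvPass2 go L l (cs, k)).1.length = cs.length := by
  intro l
  induction l with
  | nil => intro cs k; rfl
  | cons i l ih =>
    intro cs k
    rw [pvPass2_cons]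
    by_cases hi : i ∈ go
    · simp [hi, ih]
    · by_cases hk : k < L <;> simp [hi, hk, ih, List.length_set]

lemma pvPass2_untouched (go : List Nat) (L : Int) :
    ∀ (l : List Nat) (cs : List String) (k : Int) (j : Nat),
    (j ∈ go ∨ j ∉ l) → (pvPass2 go L l (cs, k)).1[j]? = cs[j]? := by
  intro l
  induction l with
  | nil => intro cs k j _; rfl
  | cons i l ih =>
    intro cs k j hj
    have hjl : j ∈ go ∨ j ∉ l := by
      rcases hj with h | h
      · exact Or.inl h
      · exact Or.inr (fun hm => h (List.mem_cons_of_mem _ hm))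
    have hij : i ∉ go → j ≠ i := by
      intro hig
      rcases hj with h | h
      · intro he; exact hig (he ▸ h)
      · intro he; exact h (he ▸ List.mem_cons_self)
    rw [pvPass2_cons]
    by_cases hi : i ∈ go
    · simp [hi, ih _ _ _ hjl]
    · by_cases hk : k < L <;>
        simp [hi, hk, ih _ _ _ hjl, List.getElem?_set, Ne.symm (hij hi)]

lemma pvPass2_at (go : List Nat) (L : Int) :
    ∀ (l₁ : List Nat) (l₂ : List Nat) (cs : List String) (k : Int) (j : Nat),
    j ∉ go → j ∉ l₁ → j ∉ l₂ → j < cs.length →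
    (pvPass2 go L (l₁ ++ j :: l₂) (cs, k)).1[j]? =
      some (if k + (l₁.countP (fun i => decide (i ∉ go)) : Int) < L then "partial" else "incorrect") := by
  intro l₁
  induction l₁ with
  | nil =>
    intro l₂ cs k j hjg _ hjl₂ hjcs
    rw [List.nil_append, pvPass2_cons]
    by_cases hk : k < L <;>
      simp [hjg, hk, pvPass2_untouched go L l₂ _ _ j (Or.inr hjl₂), List.getElem?_set, hjcs]
  | cons i l₁ ih =>
    intro l₂ cs k j hjg hjl₁ hjl₂ hjcs
    have hji : j ≠ i := fun he => hjl₁ (he ▸ List.mem_cons_self)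
    have hjl₁' : j ∉ l₁ := fun hm => hjl₁ (List.mem_cons_of_mem _ hm)
    rw [List.cons_append, pvPass2_cons]
    by_cases hi : i ∈ go
    · rw [if_pos hi, ih l₂ cs k j hjg hjl₁' hjl₂ hjcs]
      simp [List.countP_cons, hi]
    · by_cases hk : k < L
      · rw [if_neg hi, if_pos hk,
          ih l₂ (cs.set i "partial") (k + 1) j hjg hjl₁' hjl₂ (by simpa using hjcs)]
        have : (List.countP (fun i => decide (i ∉ go)) (i :: l₁) : Int)
            = (List.countP (fun i => decide (i ∉ go)) l₁ : Int) + 1 := by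
          simp [List.countP_cons, hi]
        rw [this]
        congr 1
        split_ifs with h1 h2 h2 <;> first | rfl | (exfalso; omega)
      · rw [if_neg hi, if_neg hk,
          ih l₂ (cs.set i "incorrect") k j hjg hjl₁' hjl₂ (by simpa using hjcs)]
        have hc : ∀ m : Int, 0 ≤ m → ¬ (k + m < L) := by intro m hm; omega
        rw [if_neg (hc _ (by positivity)), if_neg (hc _ (by positivity))]

def pvR' (z : List (Char × Char)) (c : Char) : Nat := z.countP (fun p => p.1 == c && !(p.2 == c))
def pvCol (z : List (Char × Char)) (j : Nat) : String :=
  let q := z.getD j (' ', ' ')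
  if q.1 == q.2 then "correct"
  else if pvM z q.1 + pvR' (z.take j) q.1 < pvG z q.1 then "partial" else "incorrect"

-- pass1 is a product of a conditional-set fold and a counting fold
lemma pv_pass1_split (go : List Nat) (gi : List Nat) (cs : List String) :
    gi.foldl (fun (st : List String × Int) i =>
      if i ∈ go then (st.1.set i "correct", st.2 + 1) else st) (cs, 0) =
    (gi.foldl (fun cs i => if i ∈ go then cs.set i "correct" else cs) cs,
     0 + (gi.countP (fun i => decide (i ∈ go)) : Int)) := by
  have hf : (fun (st : List String × Int) i =>
      if i ∈ go then (st.1.set i "correct", st.2 + 1) else st) =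
      (fun (st : List String × Int) i =>
        ((fun cs i => if i ∈ go then cs.set i "correct" else cs) st.1 i,
         (fun k i => if i ∈ go then k + 1 else k) st.2 i)) := by
    funext st i
    by_cases h : i ∈ go <;> simp [h]
  rw [hf]
  exact (PySem.List.foldl_prod_mk
      (f := fun cs i => if i ∈ go then cs.set i "correct" else cs)
      (g := fun (k : Int) i => if i ∈ go then k + 1 else k) gi cs 0).trans
    (by rw [PySem.List.foldl_ite_add_one])

lemma pvApplyGroup_length (e : Char × (List Nat × List Nat)) (cs : List String) :
    (pvApplyGroup e cs).length = cs.length := by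
  obtain ⟨c, gi, go⟩ := e
  unfold pvApplyGroup
  by_cases hgo : go = []
  · simp only [hgo, if_pos rfl]
    have := pv_setsCond_length (fun _ => True) "incorrect" gi cs
    simpa using this
  · simp only [if_neg hgo]
    rw [pv_pass1_split]
    rw [show (List.foldl (fun (st : List String × Int) i =>
      if i ∉ go then
        (if st.2 < (go.length : Int) then (st.1.set i "partial", st.2 + 1)
         else (st.1.set i "incorrect", st.2))
      else st) _ gi) = pvPass2 go (go.length : Int) gi _ from rfl]
    rw [pvPass2_length]
    exact pv_setsCond_length (fun i => i ∈ go) "correct" gi cs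

lemma pv_getD_take (t : List Char) (j i : Nat) (hij : i < j) :
    (t.take j).getD i ' ' = t.getD i ' ' := by
  simp [List.getD, List.getElem?_take, hij]

lemma pv_go_iff (t : List Char) (c : Char) (i : Nat) :
    i ∈ pvIdxs t c ↔ i < t.length ∧ t.getD i ' ' = c := pv_mem_idxs t c i

lemma pv_G_eq (s t : List Char) (h : s.length = t.length) (c : Char) :
    pvG (s.zip t) c = (pvIdxs t c).length := by
  rw [pvIdxs_length, List.count_eq_countP]
  unfold pvG
  rw [show (fun p : Char × Char => p.2 == c) = ((fun x => x == c) ∘ Prod.snd) from rfl,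
      ← List.countP_map, List.map_snd_zip (by omega)]

lemma pv_M_eq (s t : List Char) (h : s.length = t.length) (c : Char) :
    (pvIdxs s c).countP (fun i => decide (i ∈ pvIdxs t c)) = pvM (s.zip t) c := by
  have h1 : (pvIdxs s c).countP (fun i => decide (i ∈ pvIdxs t c))
      = (pvIdxs s c).countP (fun i => t.getD i ' ' == c) := by
    apply List.countP_congr
    intro i hi
    have hin : i < s.length := ((pv_mem_idxs s c i).mp hi).1
    simp [pv_go_iff, beq_iff_eq]
    intro _; omega
  rw [h1]
  exact pv_bridge s t h c (fun x => x == c)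

lemma pv_R_eq (s t : List Char) (h : s.length = t.length) (c : Char) (j : Nat) (hj : j < s.length) :
    (pvIdxs (s.take j) c).countP (fun i => decide (i ∉ pvIdxs t c)) = pvR' ((s.zip t).take j) c := by
  have hlen : (s.take j).length = (t.take j).length := by simp; omega
  have h1 : (pvIdxs (s.take j) c).countP (fun i => decide (i ∉ pvIdxs t c))
      = (pvIdxs (s.take j) c).countP (fun i => !((t.take j).getD i ' ' == c)) := by
    apply List.countP_congr
    intro i hi
    have hij : i < j := by
      have := ((pv_mem_idxs (s.take j) c i).mp hi).1
      simp at this; omega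
    rw [pv_getD_take t j i hij]
    simp only [pv_go_iff, decide_eq_true_eq, Bool.not_eq_true', beq_eq_false_iff_ne, ne_eq]
    constructor
    · intro hn; intro he; exact hn ⟨by omega, he⟩
    · intro hn hb; exact hn hb.2
  rw [h1]
  rw [pv_bridge (s.take j) (t.take j) hlen c (fun x => !(x == c)), ← pv_take_zip]
  rfl

lemma pvCol_eq (z : List (Char × Char)) (j : Nat) :
    pvCol z j = (if (z.getD j (' ', ' ')).1 == (z.getD j (' ', ' ')).2 then "correct"
      else if pvM z (z.getD j (' ', ' ')).1 + pvR' (z.take j) (z.getD j (' ', ' ')).1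
          < pvG z (z.getD j (' ', ' ')).1 then "partial" else "incorrect") := rfl

lemma pv_group_at (s t : List Char) (h : s.length = t.length) (c : Char) (cs : List String)
    (hcs : cs.length = s.length) (j : Nat) :
    (pvApplyGroup (c, (pvIdxs s c, pvIdxs t c)) cs)[j]? =
      if j < s.length ∧ s.getD j ' ' = c then some (pvCol (s.zip t) j) else cs[j]? := by
  have hsets : (fun (cs : List String) (i : Nat) => cs.set i "incorrect")
      = (fun cs i => if (fun _ => True) i then cs.set i "incorrect" else cs) := by
    funext cs i; simp
  unfold pvApplyGroup
  simp only []
  by_cases hjc : j < s.length ∧ s.getD j ' ' = c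
  · obtain ⟨hjn, hsj⟩ := hjc
    have hjgi : j ∈ pvIdxs s c := (pv_mem_idxs s c j).mpr ⟨hjn, hsj⟩
    have hq : (s.zip t).getD j (' ', ' ') = (s.getD j ' ', t.getD j ' ') :=
      pv_getD_zip s t h j hjn
    rw [if_pos (show j < s.length ∧ s.getD j ' ' = c from ⟨hjn, hsj⟩)]
    by_cases htj : t.getD j ' ' = c
    · -- correct position
      have hjgo : j ∈ pvIdxs t c := (pv_mem_idxs t c j).mpr ⟨by omega, htj⟩
      have hgo : pvIdxs t c ≠ [] := by intro he; rw [he] at hjgo; exact absurd hjgo (by simp)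
      rw [if_neg hgo, pv_pass1_split]
      rw [show (List.foldl (fun (st : List String × Int) i =>
        if i ∉ pvIdxs t c then
          (if st.2 < ((pvIdxs t c).length : Int) then (st.1.set i "partial", st.2 + 1)
           else (st.1.set i "incorrect", st.2))
        else st) _ (pvIdxs s c)) = pvPass2 (pvIdxs t c) ((pvIdxs t c).length : Int) (pvIdxs s c) _ from rfl]
      rw [pvPass2_untouched _ _ _ _ _ j (Or.inl hjgo)]
      rw [pv_setsCond (fun i => i ∈ pvIdxs t c) "correct" (pvIdxs s c) cs j]
      rw [if_pos ⟨hjgi, hjgo⟩, if_pos (by omega)]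
      rw [pvCol_eq, hq]
      simp only [hsj, htj]
      rw [if_pos (by simp)]
    · -- non-goal position of this character
      have hjgo : j ∉ pvIdxs t c := by
        intro hm; exact htj ((pv_mem_idxs t c j).mp hm).2
      have hne : ((c == t.getD j ' ') = true) → False := by
        intro he; exact htj (beq_iff_eq.mp he).symm
      by_cases hgo : pvIdxs t c = []
      · rw [if_pos hgo, hsets,
          pv_setsCond (fun _ => True) "incorrect" (pvIdxs s c) cs j,
          if_pos ⟨hjgi, trivial⟩, if_pos (by omega)]
        have hG0 : pvG (s.zip t) c = 0 := by
          rw [pv_G_eq s t h, hgo]; rfl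
        rw [pvCol_eq, hq]
        simp only [hsj, hG0]
        rw [if_neg hne, if_neg (by omega)]
      · -- decompose gi around j
        have hdec : pvIdxs s c = pvIdxs (s.take j) c ++ j ::
            ((pvIdxs (s.drop (j + 1)) c).map (fun x => x + 1 + j)) := by
          conv_lhs => rw [← List.take_append_drop j s]
          rw [pvIdxs_append]
          have hdrop : s.drop j = c :: s.drop (j + 1) := by
            rw [List.drop_eq_getElem_cons hjn]
            congr 1
            rw [← hsj, List.getD_eq_getElem s ' ' hjn]
          rw [hdrop, pvIdxs_cons]
          have hlen : (s.take j).length = j := by simp [min_eq_left (le_of_lt hjn)]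
          rw [hlen]
          congr 1
          simp [List.map_map]
          intro a _
          omega
        have hjB1 : j ∉ pvIdxs (s.take j) c := by
          intro hm
          have h1 := ((pv_mem_idxs (s.take j) c j).mp hm).1
          rw [List.length_take] at h1
          omega
        have hjB2 : j ∉ (pvIdxs (s.drop (j + 1)) c).map (fun x => x + 1 + j) := by
          intro hm
          rcases List.mem_map.mp hm with ⟨x, _, hx⟩
          omega
        rw [if_neg hgo, pv_pass1_split]
        rw [show (List.foldl (fun (st : List String × Int) i =>
          if i ∉ pvIdxs t c then
            (if st.2 < ((pvIdxs t c).length : Int) then (st.1.set i "partial", st.2 + 1)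
             else (st.1.set i "incorrect", st.2))
          else st) _ (pvIdxs s c)) = pvPass2 (pvIdxs t c) ((pvIdxs t c).length : Int) (pvIdxs s c) _ from rfl]
        rw [pv_M_eq s t h c]
        rw [hdec]
        rw [pvPass2_at _ _ _ _ _ _ j hjgo hjB1 hjB2
          (by rw [pv_setsCond_length]; omega)]
        rw [pv_R_eq s t h c j hjn]
        rw [pvCol_eq, hq]
        simp only [hsj]
        rw [if_neg hne]
        have hGL : pvG (s.zip t) c = (pvIdxs t c).length := pv_G_eq s t h c
        congr 1
        have hiff : ((0 : Int) + (pvM (s.zip t) c : Int) + (pvR' ((s.zip t).take j) c : Int)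
            < ((pvIdxs t c).length : Int)) ↔
            (pvM (s.zip t) c + pvR' ((s.zip t).take j) c < pvG (s.zip t) c) := by
          rw [hGL]; omega
        rw [if_congr hiff rfl rfl]
  · rw [if_neg hjc]
    have hjgi : j ∉ pvIdxs s c := by
      intro hm; exact hjc ((pv_mem_idxs s c j).mp hm)
    by_cases hgo : pvIdxs t c = []
    · rw [if_pos hgo, hsets, pv_setsCond (fun _ => True) "incorrect" (pvIdxs s c) cs j]
      simp [hjgi]
    · rw [if_neg hgo, pv_pass1_split]
      rw [show (List.foldl (fun (st : List String × Int) i =>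
        if i ∉ pvIdxs t c then
          (if st.2 < ((pvIdxs t c).length : Int) then (st.1.set i "partial", st.2 + 1)
           else (st.1.set i "incorrect", st.2))
        else st) _ (pvIdxs s c)) = pvPass2 (pvIdxs t c) ((pvIdxs t c).length : Int) (pvIdxs s c) _ from rfl]
      rw [pvPass2_untouched _ _ _ _ _ j (Or.inr hjgi)]
      rw [pv_setsCond (fun i => i ∈ pvIdxs t c) "correct" (pvIdxs s c) cs j]
      simp [hjgi]

lemma pv_dict_val_aux (F : Char → List Nat × List Nat) :
    ∀ (l : List (Char × Nat)) (d : PySem.Dict Char (List Nat × List Nat)),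
    (∀ p ∈ d.items, p.2 = F p.1) →
    ∀ p ∈ (l.foldl (fun d q => d.insert q.1 (F q.1)) d).items, p.2 = F p.1 := by
  intro l
  induction l with
  | nil => intro d hd; exact hd
  | cons q l ih =>
    intro d hd
    rw [List.foldl_cons]
    apply ih
    intro p hp
    rcases (PySem.Dict.mem_items_insert d q.1 (F q.1) p).mp hp with h | h
    · rw [h]
    · exact hd p h.1

lemma pvCharDict_items_val (s t : List Char) :
    ∀ p ∈ (pvCharDict s t).items, p.2 = (pvIdxs s p.1, pvIdxs t p.1) := by
  apply pv_dict_val_aux (fun c => (pvIdxs s c, pvIdxs t c)) s.zipIdx PySem.Dict.empty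
  intro p hp
  simp [PySem.Dict.empty] at hp

lemma pvCharDict_keys (s t : List Char) :
    (pvCharDict s t).keys = PySem.Set.ofList s := by
  unfold pvCharDict
  rw [PySem.Dict.keys_foldl_insert_key s.zipIdx Prod.fst
    (fun d x => (pvIdxs s x.1, pvIdxs t x.1)) PySem.Dict.empty]
  rw [pv_map_fst_zipIdx]
  rfl

lemma pv_items_fold (s t : List Char) (h : s.length = t.length) :
    ∀ (L : List (Char × (List Nat × List Nat))) (cs : List String),
    cs.length = s.length → (L.map Prod.fst).Nodup →
    (∀ p ∈ L, p.2 = (pvIdxs s p.1, pvIdxs t p.1)) →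
    ∀ j, (L.foldl (fun cs e => pvApplyGroup e cs) cs)[j]? =
      if j < s.length ∧ s.getD j ' ' ∈ L.map Prod.fst then some (pvCol (s.zip t) j)
      else cs[j]? := by
  intro L
  induction L with
  | nil => intro cs _ _ _ j; simp
  | cons e L ih =>
    intro cs hcs hnd hval j
    obtain ⟨c, v⟩ := e
    have hv : v = (pvIdxs s c, pvIdxs t c) := hval (c, v) List.mem_cons_self
    subst hv
    rw [List.foldl_cons]
    have hnd' : (L.map Prod.fst).Nodup := by simpa using hnd.of_cons
    have hcnot : c ∉ L.map Prod.fst := by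
      simp only [List.map_cons] at hnd
      exact (List.nodup_cons.mp hnd).1
    have hval' : ∀ p ∈ L, p.2 = (pvIdxs s p.1, pvIdxs t p.1) :=
      fun p hp => hval p (List.mem_cons_of_mem _ hp)
    have hlen' : (pvApplyGroup (c, (pvIdxs s c, pvIdxs t c)) cs).length = s.length := by
      rw [pvApplyGroup_length]; exact hcs
    rw [ih _ hlen' hnd' hval' j]
    have hmemcons : ∀ x : Char,
        x ∈ List.map Prod.fst ((c, (pvIdxs s c, pvIdxs t c)) :: L) ↔
          (x = c ∨ x ∈ List.map Prod.fst L) := by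
      intro x; rw [List.map_cons, List.mem_cons]
    by_cases hjn : j < s.length
    · by_cases hjL : s.getD j ' ' ∈ L.map Prod.fst
      · rw [if_pos ⟨hjn, hjL⟩, if_pos ⟨hjn, (hmemcons _).mpr (Or.inr hjL)⟩]
      · rw [if_neg (fun hh => hjL hh.2)]
        rw [pv_group_at s t h c cs hcs j]
        by_cases hjc : s.getD j ' ' = c
        · rw [if_pos ⟨hjn, hjc⟩, if_pos ⟨hjn, (hmemcons _).mpr (Or.inl hjc)⟩]
        · rw [if_neg (fun hh => hjc hh.2),
            if_neg (fun hh => (((hmemcons _).mp hh.2).elim hjc hjL))]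
    · rw [if_neg (fun hh => hjn hh.1),
        pv_group_at s t h c cs hcs j,
        if_neg (fun hh => hjn hh.1), if_neg (fun hh => hjn hh.1)]

lemma pv_A_model (s t : List Char) (h : s.length = t.length) :
    (pvCharDict s t).items.foldl (fun cs e => pvApplyGroup e cs) (List.replicate s.length "neutral")
      = (List.range (s.zip t).length).map (pvCol (s.zip t)) := by
  have hkeys : (pvCharDict s t).items.map Prod.fst = PySem.Set.ofList s := by
    rw [← pvCharDict_keys s t]; rfl
  apply List.ext_getElem?
  intro j
  rw [pv_items_fold s t h _ _ (by simp) (by rw [hkeys]; exact PySem.Set.nodup_ofList s)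
    (pvCharDict_items_val s t) j]
  have hzlen : (s.zip t).length = s.length := by simp [List.length_zip]; omega
  by_cases hjn : j < s.length
  · have hmem : s.getD j ' ' ∈ (pvCharDict s t).items.map Prod.fst := by
      rw [hkeys, PySem.Set.mem_ofList]
      rw [List.getD_eq_getElem s ' ' hjn]
      exact List.getElem_mem hjn
    rw [if_pos ⟨hjn, hmem⟩, List.getElem?_map]
    rw [List.getElem?_range (by omega : j < (s.zip t).length)]
    rfl
  · rw [if_neg (by tauto), List.getElem?_map, List.getElem?_replicate]
    rw [List.getElem?_eq_none (by rw [List.length_range]; omega)]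
    simp [hjn]

lemma pv_counts_getD (z : List (Char × Char)) (c : Char) :
    (z.foldl (fun d p => if p.1 ≠ p.2 then d.insert p.2 (d.getD p.2 0 + 1) else d)
      PySem.Dict.empty).getD c 0 = (pvI z c : Int) := by
  have e1 := PySem.List.foldl_ite_eq_foldl_filter (fun p : Char × Char => p.1 ≠ p.2)
    (fun (d : PySem.Dict Char Int) (p : Char × Char) => d.insert p.2 (d.getD p.2 0 + 1))
    z PySem.Dict.empty
  have e2 : ((z.filter (fun p => decide (p.1 ≠ p.2))).foldl
      (fun (d : PySem.Dict Char Int) p => d.insert p.2 (d.getD p.2 0 + 1))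
      PySem.Dict.empty).getD c 0 = (pvI z c : Int) := by
    rw [← List.foldl_map (f := Prod.snd)
      (g := fun (d : PySem.Dict Char Int) x => d.insert x (d.getD x 0 + 1))]
    rw [PySem.Dict.getD_foldl_insert_add_one]
    rw [PySem.Dict.getD_empty]
    rw [List.count_eq_countP, List.countP_map, List.countP_filter]
    unfold pvI
    have e3 := List.countP_congr (l := z)
      (p := fun p : Char × Char => ((fun x => x == c) ∘ Prod.snd) p && decide (p.1 ≠ p.2))
      (q := fun p : Char × Char => p.2 == c && !(p.1 == p.2))
      (by
        intro p _
        by_cases h2 : p.2 = c <;> by_cases h12 : p.1 = p.2 <;>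
          simp [Function.comp, h2, h12])
    exact_mod_cast (Nat.zero_add _).trans e3
  exact Eq.trans (congrArg (fun d => PySem.Dict.getD d c 0) e1) e2

lemma pv_snoc_range (f : Nat → String) (n m : Nat) (acc : List String) (x : String)
    (hx : x = f n) :
    (acc ++ [x]) ++ (List.range m).map (fun k => f (n + 1 + k)) =
      acc ++ (List.range (m + 1)).map (fun k => f (n + k)) := by
  subst hx
  rw [List.range_succ_eq_map, List.map_cons, List.map_map]
  rw [show ((fun k => f (n + k)) ∘ Nat.succ) = (fun k => f (n + 1 + k)) from
    funext fun k => by simp [Function.comp]; congr 1; omega]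
  simp

lemma pv_R_snoc (pre : List (Char × Char)) (q : Char × Char) (c : Char) :
    pvR' (pre ++ [q]) c = pvR' pre c + (if q.1 = c ∧ q.2 ≠ c then 1 else 0) := by
  unfold pvR'
  rw [List.countP_append]
  congr 1
  by_cases h1 : q.1 = c <;> by_cases h2 : q.2 = c <;> simp [h1, h2]

lemma pv_B_loop (z : List (Char × Char)) :
    ∀ (u pre : List (Char × Char)) (acc : List String) (d : PySem.Dict Char Int),
    z = pre ++ u →
    (∀ c, d.getD c 0 = (pvI z c : Int) - ((min (pvR' pre c) (pvI z c) : Nat) : Int)) →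
    (u.foldl pvBStep (acc, d)).1 =
      acc ++ (List.range u.length).map (fun k => pvCol z (pre.length + k)) := by
  intro u
  induction u with
  | nil => intro pre acc d hz hinv; simp
  | cons q u ihu =>
    intro pre acc d hz hinv
    have hq : z.getD pre.length (' ', ' ') = q := by
      show z[pre.length]?.getD (' ', ' ') = q
      rw [← PySem.List.pyGet?_natCast, hz, PySem.List.pyGet?_append_length]
      rfl
    have htake : z.take pre.length = pre := by rw [hz]; exact List.take_left
    have hcol : ∀ str : String,
        ((¬ q.1 = q.2) → str = (if pvM z q.1 + pvR' pre q.1 < pvG z q.1 then "partial" else "incorrect")) →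
        (q.1 = q.2 → str = "correct") → str = pvCol z (pre.length) := by
      intro str h1 h2
      rw [pvCol_eq, hq]
      by_cases hqe : q.1 = q.2
      · rw [if_pos (by simp [hqe]), h2 hqe]
      · rw [if_neg (by simp [hqe]), htake]
        exact h1 hqe
    rw [List.foldl_cons]
    by_cases hqe : q.1 = q.2
    · rw [show pvBStep (acc, d) q = (acc ++ ["correct"], d) from by
        unfold pvBStep; rw [if_pos hqe]]
      rw [ihu (pre ++ [q]) _ _ (by rw [hz]; simp) ?_]
      · rw [List.length_append, List.length_singleton, List.length_cons]
        exact pv_snoc_range _ _ _ _ _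
          (hcol "correct" (fun hc => absurd hqe hc) (fun _ => rfl))
      · intro c
        rw [pv_R_snoc, if_neg (by rintro ⟨h1, h2⟩; exact h2 (h1 ▸ hqe ▸ rfl))]
        simpa using hinv c
    · have hI := hinv q.1
      have hGMI := pvSplitGMI z q.1
      by_cases hpos : d.getD q.1 0 > 0
      · -- partial
        have hRI : pvR' pre q.1 < pvI z q.1 := by
          rcases Nat.le_total (pvR' pre q.1) (pvI z q.1) with hle | hle
          · rw [min_eq_left hle] at hI; omega
          · rw [min_eq_right hle] at hI; omega
        rw [show pvBStep (acc, d) q =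
            (acc ++ ["partial"], d.insert q.1 (d.getD q.1 0 - 1)) from by
          unfold pvBStep; rw [if_neg hqe, if_pos hpos]]
        rw [ihu (pre ++ [q]) _ _ (by rw [hz]; simp) ?_]
        · rw [List.length_append, List.length_singleton, List.length_cons]
          exact pv_snoc_range _ _ _ _ _
            (hcol "partial" (fun _ => by rw [if_pos (by omega)]) (fun hc => absurd hc hqe))
        · intro c
          by_cases hc : c = q.1
          · subst hc
            rw [PySem.Dict.getD_insert_self]
            rw [pv_R_snoc, if_pos ⟨rfl, fun he => hqe he.symm⟩]
            rw [min_eq_left (by omega : pvR' pre q.1 + 1 ≤ pvI z q.1)]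
            rw [min_eq_left (le_of_lt hRI)] at hI
            omega
          · rw [PySem.Dict.getD_insert_of_ne _ _ _ hc]
            rw [pv_R_snoc, if_neg (by rintro ⟨h1, _⟩; exact hc h1.symm)]
            simpa using hinv c
      · -- incorrect
        have hRI : pvI z q.1 ≤ pvR' pre q.1 := by
          rcases Nat.le_total (pvR' pre q.1) (pvI z q.1) with hle | hle
          · rw [min_eq_left hle] at hI; omega
          · exact hle
        rw [show pvBStep (acc, d) q = (acc ++ ["incorrect"], d) from by
          unfold pvBStep; rw [if_neg hqe, if_neg hpos]]
        rw [ihu (pre ++ [q]) _ _ (by rw [hz]; simp) ?_]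
        · rw [List.length_append, List.length_singleton, List.length_cons]
          exact pv_snoc_range _ _ _ _ _
            (hcol "incorrect" (fun _ => by rw [if_neg (by omega)]) (fun hc => absurd hc hqe))
        · intro c
          by_cases hc : c = q.1
          · subst hc
            rw [pv_R_snoc, if_pos ⟨rfl, fun he => hqe he.symm⟩,
              min_eq_right (by omega : pvI z q.1 ≤ pvR' pre q.1 + 1)]
            rw [min_eq_right hRI] at hI
            exact hI
          · rw [pv_R_snoc, if_neg (by rintro ⟨h1, _⟩; exact hc h1.symm)]
            simpa using hinv c

lemma pv_B_model (z : List (Char × Char)) :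
    (z.foldl pvBStep ([],
        z.foldl (fun d p => if p.1 ≠ p.2 then d.insert p.2 (d.getD p.2 0 + 1) else d)
          PySem.Dict.empty)).1 = (List.range z.length).map (pvCol z) := by
  rw [pv_B_loop z z [] [] _ (by simp) (by
    intro c
    rw [pv_counts_getD]
    simp [pvR'])]
  simp

lemma pvPrep_length (w : String) : (pvPrep w).length = (PySem.Chars.strip w.toList).length := by
  simp [pvPrep, PySem.Chars.upper]

-- ===== VERDICT (by name: the statement is the Claim_ definition above) =====
theorem get_complete_colours_spec : Claim_equal_get_complete_colours := by
  intro guess goal_word _ hpre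
  unfold Spec_get_complete_colours get_complete_colours get_complete_colours_alt
  have h : (pvPrep guess).length = (pvPrep goal_word).length := by
    rw [pvPrep_length, pvPrep_length]; exact hpre
  rw [pv_A_model _ _ h, pv_B_model]
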